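-- pv_equiv track=rewrite | github.com/kazuhayase/study | GCJ/2017/Qualification/ProbC/Small/SmallProbC.py | solve
-- ===== SOURCE A (Python) =====
-- import heapq
--
-- def solve(N,K):
--     q=[]
--     heapq.heappush(q,N*-1)
--     ma=mb=0
--     for i in range(K):
--         a=heapq.heappop(q)
--         a *= -1
--         ma=(a-1)>>1
--         mb=a-1-ma
--         heapq.heappush(q,ma*-1)
--         heapq.heappush(q,mb*-1)
--     return(' '.join(map(str,[max(ma,mb), min(ma,mb)])))
-- ===== SOURCE B (Python) =====
-- # Run-length processing of segment sizes: instead of a heap holding every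
-- # segment, keep a descending list of (size, count) runs and split a whole run
-- # of equal largest segments at once; the two halves of a size come from
-- # closed-form floor divisions.
-- def _insert(runs, x, c):
--     """Merge a run of c segments of size x into the descending run list."""
--     i = 0
--     while i < len(runs) and runs[i][0] > x:
--         i += 1
--     if i < len(runs) and runs[i][0] == x:
--         runs[i] = (x, runs[i][1] + c)
--     else:
--         runs.insert(i, (x, c))
--
-- def solve(N, K):
--     if K <= 0:
--         return "0 0"
--     runs = [(N, 1)]              # segment sizes, descending, run-length encoded
--     while True:
--         a, c = runs.pop(0)       # every one of the c largest segments splits before any smaller one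
--         if K <= c:
--             break
--         K -= c
--         _insert(runs, (a - 1) // 2, c)
--         _insert(runs, a // 2, c)
--     return "%d %d" % (a // 2, (a - 1) // 2)
-- ===== Notes on version B (the rewrite author's own statement) =====
-- stated objective: faster
-- what changed: Replaces the binary heap of K negated segment sizes (one heappush/heappop per split) by a descending run-length encoded list of (size, count) runs whose whole run of equal largest sizes is split in one step, with the printed halves computed by closed-form floor divisions; Pre_ excludes N <= -2 with K >= 2, where repeatedly splitting a negative 'length' is outside the task's natural domain and A's values are artefacts of its heap encoding (N >= -1 and single-split calls K <= 1 are admitted and proved for every N).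
-- outside the precondition, e.g. on solve(-9, 3): A returns '-2 -2', B returns '-3 -3'; on solve(-7, 4): A returns '-1 -1', B returns '-1 -2'
import Mathlib
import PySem

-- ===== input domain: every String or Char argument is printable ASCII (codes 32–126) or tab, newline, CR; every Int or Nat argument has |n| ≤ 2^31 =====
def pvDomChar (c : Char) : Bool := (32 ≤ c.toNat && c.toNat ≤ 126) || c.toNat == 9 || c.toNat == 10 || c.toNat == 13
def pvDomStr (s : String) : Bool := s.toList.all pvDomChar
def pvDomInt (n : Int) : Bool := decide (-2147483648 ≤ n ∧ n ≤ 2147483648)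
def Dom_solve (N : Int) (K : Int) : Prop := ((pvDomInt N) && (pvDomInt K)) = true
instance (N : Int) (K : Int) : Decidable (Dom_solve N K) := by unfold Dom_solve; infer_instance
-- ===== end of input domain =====

-- B replaces the heap of negated sizes by a descending run-length encoded list of
-- (size, count) runs, splitting a whole run of equal largest sizes in one step, and
-- prints the halves of the last popped size via closed-form floor divisions (faster
-- where runs stay large); equivalence is claimed for N ≥ 0.

-- ===== PORT A =====
-- heapq model: Python's heapq is a priority queue observed only through heappush and
-- heappop (pop = minimum); it is ported as a leftist min-heap with exactly those two
-- operations — exact for every value A observes (heappop's results).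
inductive LHeap where
  | nil : LHeap
  | node : Nat → Int → LHeap → LHeap → LHeap

def LHeap.size : LHeap → Nat
  | .nil => 0
  | .node _ _ l r => l.size + r.size + 1

def LHeap.rank : LHeap → Nat
  | .nil => 0
  | .node k _ _ _ => k

-- rebuild a node, keeping the larger-rank child on the left (depth stays logarithmic)
def lmk (v : Int) (a b : LHeap) : LHeap :=
  if LHeap.rank b ≤ LHeap.rank a then .node (LHeap.rank b + 1) v a b
  else .node (LHeap.rank a + 1) v b a

def lmerge : LHeap → LHeap → LHeap
  | .nil, h => h
  | h, .nil => h
  | .node k1 a l1 r1, .node k2 b l2 r2 =>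
    if a ≤ b then lmk a l1 (lmerge r1 (.node k2 b l2 r2))
    else lmk b l2 (lmerge (.node k1 a l1 r1) r2)
termination_by h1 h2 => h1.size + h2.size
decreasing_by all_goals (simp [LHeap.size]; try omega)

def heapPush (x : Int) (q : LHeap) : LHeap := lmerge (.node 1 x .nil .nil) q

-- heappop: returns the minimum and the rest; an empty heap is unreachable in solve
-- (heappop would raise IndexError there).
def heapPop : LHeap → Int × LHeap
  | .nil => (0, .nil)
  | .node _ v l r => (v, lmerge l r)

-- the 'for i in range(K)' loop, state (q, ma, mb)
def solveLoop : Nat → LHeap → Int → Int → LHeap × Int × Int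
  | 0, q, ma, mb => (q, ma, mb)
  | n + 1, q, _, _ =>
    let p := heapPop q
    let a := p.1 * -1
    let ma := (a - 1) >>> (1 : Nat)
    let mb := a - 1 - ma
    solveLoop n (heapPush (mb * -1) (heapPush (ma * -1) p.2)) ma mb

def solve (N : Int) (K : Int) : String :=
  let q := heapPush (N * -1) .nil
  let r := solveLoop K.toNat q 0 0
  PySem.Str.join " " [PySem.Int.toStr (max r.2.1 r.2.2), PySem.Int.toStr (min r.2.1 r.2.2)]

-- ===== PORT B =====
-- _insert: ordered insert of a run into the strictly-descending run list, merging equal sizes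
def rleInsert (runs : List (Int × Int)) (x : Int) (c : Int) : List (Int × Int) :=
  match runs with
  | [] => [(x, c)]
  | (v, d) :: t =>
    if v > x then (v, d) :: rleInsert t x c
    else if v = x then (v, d + c) :: t
    else (x, c) :: (v, d) :: t

-- Source B's 'while True' loop, returning the last popped size a.
-- 'max c 1' is a totality guard only: Source B reaches this loop only with K ≥ 1 and every
-- run count c ≥ 1, where it changes nothing; [] is unreachable (pop(0) would raise).
def altLoop (runs : List (Int × Int)) (K : Int) : Int :=
  match runs with
  | [] => 0
  | (v, c) :: t =>
    if K ≤ 0 then v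
    else if K ≤ c then v
    else altLoop (rleInsert (rleInsert t (PySem.Int.floordiv (v - 1) 2) c) (PySem.Int.floordiv v 2) c) (K - max c 1)
termination_by K.toNat
decreasing_by omega

def solve_alt (N : Int) (K : Int) : String :=
  if K ≤ 0 then "0 0"
  else
    let a := altLoop [(N, 1)] K
    PySem.Int.toStr (PySem.Int.floordiv a 2) ++ " " ++ PySem.Int.toStr (PySem.Int.floordiv (a - 1) 2)

-- ===== PRECONDITION & SPEC =====
-- Pre_ excludes N ≤ -2 with K ≥ 2: repeatedly splitting a negative 'length' is outside
-- the task's natural domain, and A's repeated halving of such sizes is an artefact of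
-- its heap encoding (N ≥ -1 keeps every segment size ≥ -1, and K ≤ 1 performs at most
-- one split; both are admitted and proved).
def Pre_solve (N : Int) (K : Int) : Prop := -1 ≤ N ∨ K ≤ 1
instance (N : Int) (K : Int) : Decidable (Pre_solve N K) := by unfold Pre_solve; infer_instance
def pvWitness_solve : Int × Int := (19, 5)

def Spec_solve (N : Int) (K : Int) (out : String) : Prop := out = solve_alt N K
instance (N : Int) (K : Int) (out : String) : Decidable (Spec_solve N K out) := by unfold Spec_solve; infer_instance

-- ===== CLAIM (what is proved, stated in full; the proofs are below) =====
def Claim_equal_solve : Prop := ∀ (N : Int) (K : Int), Dom_solve N K → Pre_solve N K → Spec_solve N K (solve N K)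

-- ===== LEMMAS AND PROOFS =====

-- Python's arithmetic shift (a-1)>>1 is floor division by 2
theorem shiftR_one_eq_floordiv (a : Int) : a >>> (1 : Nat) = PySem.Int.floordiv a 2 := by
  rw [PySem.Int.floordiv_eq_ediv_of_pos (by omega)]
  have h := Int.shiftRight_eq_div_pow a 1
  norm_num at h
  exact h

theorem floordiv_pair (a : Int) :
    a - 1 - PySem.Int.floordiv (a - 1) 2 = PySem.Int.floordiv a 2 := by
  rw [PySem.Int.floordiv_eq_ediv_of_pos (by omega), PySem.Int.floordiv_eq_ediv_of_pos (by omega)]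
  omega

theorem floordiv_le (a : Int) :
    PySem.Int.floordiv (a - 1) 2 ≤ PySem.Int.floordiv a 2 := by
  rw [PySem.Int.floordiv_eq_ediv_of_pos (by omega), PySem.Int.floordiv_eq_ediv_of_pos (by omega)]
  omega

theorem child_lo_le (v : Int) (h : -1 ≤ v) : PySem.Int.floordiv (v - 1) 2 ≤ v := by
  rw [PySem.Int.floordiv_eq_ediv_of_pos (by omega)]
  omega

theorem child_hi_le (v : Int) (h : -1 ≤ v) : PySem.Int.floordiv v 2 ≤ v := by
  rw [PySem.Int.floordiv_eq_ediv_of_pos (by omega)]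
  omega

theorem child_lo_ge (v : Int) (h : -1 ≤ v) : -1 ≤ PySem.Int.floordiv (v - 1) 2 := by
  rw [PySem.Int.floordiv_eq_ediv_of_pos (by omega)]
  omega

theorem child_hi_ge (v : Int) (h : -1 ≤ v) : -1 ≤ PySem.Int.floordiv v 2 := by
  rw [PySem.Int.floordiv_eq_ediv_of_pos (by omega)]
  omega

-- ---- intermediate model: plain descending list of sizes, one pop per step ----
def insertDesc (sizes : List Int) (x : Int) : List Int :=
  match sizes with
  | [] => [x]
  | h :: t => if h ≥ x then h :: insertDesc t x else x :: h :: t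

def midLoop : Nat → List Int → Int → List Int × Int
  | 0, s, a => (s, a)
  | n + 1, s, a0 =>
    match s with
    | [] => ([], a0)
    | a :: t =>
      midLoop n (insertDesc (insertDesc t (PySem.Int.floordiv (a - 1) 2)) (PySem.Int.floordiv a 2)) a

-- ---- leftist-heap semantics: multiset contents and the min-at-root invariant ----
def toMS : LHeap → Multiset Int
  | .nil => 0
  | .node _ v l r => v ::ₘ (toMS l + toMS r)

def HpH : LHeap → Prop
  | .nil => True
  | .node _ v l r => (∀ x ∈ toMS l, v ≤ x) ∧ (∀ x ∈ toMS r, v ≤ x) ∧ HpH l ∧ HpH r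

theorem toMS_lmk (v : Int) (a b : LHeap) : toMS (lmk v a b) = v ::ₘ (toMS a + toMS b) := by
  unfold lmk
  split
  · rfl
  · simp only [toMS]
    rw [add_comm]

theorem Hp_lmk (v : Int) (a b : LHeap) (ha : ∀ x ∈ toMS a, v ≤ x) (hb : ∀ x ∈ toMS b, v ≤ x)
    (hpa : HpH a) (hpb : HpH b) : HpH (lmk v a b) := by
  unfold lmk
  split
  · exact ⟨ha, hb, hpa, hpb⟩
  · exact ⟨hb, ha, hpb, hpa⟩

theorem toMS_lmerge (a b : LHeap) : toMS (lmerge a b) = toMS a + toMS b := by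
  fun_induction lmerge a b with
  | case1 h => simp [toMS]
  | case2 h => simp [toMS]
  | case3 k1 x l1 r1 k2 y l2 r2 hle ih =>
    simp only [toMS, toMS_lmk, ih]
    simp only [← Multiset.singleton_add]
    abel
  | case4 k1 x l1 r1 k2 y l2 r2 hle ih =>
    simp only [toMS, toMS_lmk, ih]
    simp only [← Multiset.singleton_add]
    abel

theorem root_le (k : Nat) (v : Int) (l r : LHeap) (h : HpH (.node k v l r)) :
    ∀ x ∈ toMS (.node k v l r), v ≤ x := by
  obtain ⟨hl, hr, _, _⟩ := h
  intro x hx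
  simp only [toMS, Multiset.mem_cons, Multiset.mem_add] at hx
  rcases hx with rfl | hx | hx
  · exact le_refl x
  · exact hl x hx
  · exact hr x hx

theorem Hp_lmerge (a b : LHeap) (ha : HpH a) (hb : HpH b) : HpH (lmerge a b) := by
  fun_induction lmerge a b with
  | case1 h => exact hb
  | case2 h => exact ha
  | case3 k1 x l1 r1 k2 y l2 r2 hle ih =>
    obtain ⟨hl1, hr1, hpl1, hpr1⟩ := ha
    refine Hp_lmk x l1 _ hl1 ?_ hpl1 (ih hpr1 hb)
    intro z hz
    rw [toMS_lmerge] at hz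
    rcases Multiset.mem_add.mp hz with hz | hz
    · exact hr1 z hz
    · exact le_trans hle (root_le k2 y l2 r2 hb z hz)
  | case4 k1 x l1 r1 k2 y l2 r2 hle ih =>
    obtain ⟨hl2, hr2, hpl2, hpr2⟩ := hb
    refine Hp_lmk y l2 _ hl2 ?_ hpl2 (ih ha hpr2)
    intro z hz
    rw [toMS_lmerge] at hz
    rcases Multiset.mem_add.mp hz with hz | hz
    · exact le_trans (by omega) (root_le k1 x l1 r1 ha z hz)
    · exact hr2 z hz

theorem toMS_push (x : Int) (q : LHeap) : toMS (heapPush x q) = x ::ₘ toMS q := by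
  unfold heapPush
  rw [toMS_lmerge]
  simp [toMS, ← Multiset.singleton_add]

theorem Hp_push (x : Int) (q : LHeap) (h : HpH q) : HpH (heapPush x q) :=
  Hp_lmerge _ q ⟨by simp [toMS], by simp [toMS], trivial, trivial⟩ h

-- ---- the descending size list: insertDesc keeps order and contents ----
theorem insertDesc_ne_nil (t : List Int) (x : Int) : insertDesc t x ≠ [] := by
  cases t with
  | nil => simp [insertDesc]
  | cons h t => simp only [insertDesc]; split <;> simp

theorem mem_insertDesc (s : List Int) (x z : Int) (h : z ∈ insertDesc s x) :
    z = x ∨ z ∈ s := by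
  induction s with
  | nil => simpa [insertDesc] using h
  | cons w t ih =>
    simp only [insertDesc] at h
    split_ifs at h with hw
    · rcases List.mem_cons.mp h with rfl | h
      · exact Or.inr (by simp)
      · rcases ih h with h | h
        · exact Or.inl h
        · exact Or.inr (List.mem_cons_of_mem _ h)
    · rcases List.mem_cons.mp h with rfl | h
      · exact Or.inl rfl
      · exact Or.inr h

theorem pairwise_insertDesc (s : List Int) (x : Int) (h : List.Pairwise (· ≥ ·) s) :
    List.Pairwise (· ≥ ·) (insertDesc s x) := by
  induction s with
  | nil => simp [insertDesc]
  | cons w t ih =>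
    obtain ⟨hw, ht⟩ := List.pairwise_cons.mp h
    simp only [insertDesc]
    split_ifs with hwx
    · refine List.pairwise_cons.mpr ⟨?_, ih ht⟩
      intro z hz
      rcases mem_insertDesc t x z hz with rfl | hz
      · exact hwx
      · exact hw z hz
    · refine List.pairwise_cons.mpr ⟨?_, h⟩
      intro z hz
      rcases List.mem_cons.mp hz with rfl | hz
      · omega
      · have := hw z hz
        omega

theorem coe_insertDesc (s : List Int) (x : Int) :
    ((insertDesc s x : List Int) : Multiset Int) = x ::ₘ (s : Multiset Int) := by
  induction s with
  | nil => rfl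
  | cons w t ih =>
    simp only [insertDesc]
    split_ifs with hw
    · show ((w :: insertDesc t x : List Int) : Multiset Int) = _
      rw [← Multiset.cons_coe, ih, Multiset.cons_swap, Multiset.cons_coe]
    · rfl

-- bisimulation: A's loop on the min-heap of negated sizes tracks the descending-list loop
theorem loop_bisim (n : Nat) :
    ∀ (q : LHeap) (s : List Int) (ma mb a : Int), HpH q →
    toMS q = ((s.map (· * -1) : List Int) : Multiset Int) →
    List.Pairwise (· ≥ ·) s → s ≠ [] →
    (n = 0 → ma = PySem.Int.floordiv (a - 1) 2 ∧ mb = a - 1 - ma) →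
    (solveLoop n q ma mb).2 =
      (PySem.Int.floordiv ((midLoop n s a).2 - 1) 2,
       (midLoop n s a).2 - 1 - PySem.Int.floordiv ((midLoop n s a).2 - 1) 2) := by
  induction n with
  | zero =>
    intro q s ma mb a _ _ _ _ h0
    obtain ⟨h1, h2⟩ := h0 rfl
    simp [solveLoop, midLoop, h1, h2]
  | succ n ih =>
    intro q s ma mb a hp hms hsort hne _
    cases s with
    | nil => exact absurd rfl hne
    | cons h t =>
      cases q with
      | nil =>
        exfalso
        have : (-1 : Int) * h ∈ toMS LHeap.nil := by
          rw [hms]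
          simp [mul_comm]
        simp [toMS] at this
      | node k v l r =>
        -- the popped root is the negated head of the descending list
        have hvh : v = h * -1 := by
          have hvmem : v ∈ toMS (.node k v l r) := by simp [toMS]
          rw [hms] at hvmem
          rcases List.mem_map.mp (Multiset.mem_coe.mp hvmem) with ⟨z, hz, hzv⟩
          have hzh : z ≤ h := by
            rcases List.mem_cons.mp hz with rfl | hz
            · exact le_refl z
            · exact (List.pairwise_cons.mp hsort).1 z hz
          have hhv : h * -1 ∈ toMS (.node k v l r) := by
            rw [hms]
            exact Multiset.mem_coe.mpr (List.mem_map_of_mem (by simp))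
          have h1 := root_le k v l r hp _ hhv
          omega
        have ha : v * -1 = h := by omega
        have hrest : toMS (lmerge l r) = ((t.map (· * -1) : List Int) : Multiset Int) := by
          have : v ::ₘ (toMS l + toMS r) = v ::ₘ ((t.map (· * -1) : List Int) : Multiset Int) := by
            have := hms
            simp only [toMS, List.map_cons, ← Multiset.cons_coe] at this
            rw [this, hvh]
          rw [toMS_lmerge]
          exact (Multiset.cons_inj_right v).mp this
        simp only [solveLoop, heapPop, midLoop, ha, shiftR_one_eq_floordiv]
        rw [← floordiv_pair h]
        refine ih _ _ _ _ h (Hp_push _ _ (Hp_push _ _ (Hp_lmerge l r hp.2.2.1 hp.2.2.2)))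
          ?_ (pairwise_insertDesc _ _ (pairwise_insertDesc _ _ (List.pairwise_cons.mp hsort).2))
          (insertDesc_ne_nil _ _) (fun _ => ⟨rfl, rfl⟩)
        rw [toMS_push, toMS_push, hrest]
        have e1 := coe_insertDesc (insertDesc t (PySem.Int.floordiv (h - 1) 2))
          (h - 1 - PySem.Int.floordiv (h - 1) 2)
        have e2 := coe_insertDesc t (PySem.Int.floordiv (h - 1) 2)
        simp only [← Multiset.map_coe, e1, e2, Multiset.map_cons]

-- ---- descending-insert algebra ----
theorem insertDesc_pass (n : Nat) (v x : Int) (h : x ≤ v) (R : List Int) :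
    insertDesc (List.replicate n v ++ R) x = List.replicate n v ++ insertDesc R x := by
  induction n with
  | zero => simp
  | succ n ih =>
    simp only [List.replicate_succ, List.cons_append, insertDesc]
    rw [if_pos (by omega : v ≥ x), ih]

theorem insertDesc_cons_lt (w : Int) (t : List Int) (x : Int) (h : w < x) :
    insertDesc (w :: t) x = x :: w :: t := by
  simp only [insertDesc]
  rw [if_neg (by omega)]

theorem insertDesc_comm (L : List Int) (x y : Int) :
    insertDesc (insertDesc L x) y = insertDesc (insertDesc L y) x := by
  induction L with
  | nil =>
    simp only [insertDesc]
    split_ifs with h1 h2 h2 <;> try rfl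
    · have : x = y := by omega
      subst this; rfl
    · have : x = y := by omega
      subst this; rfl
  | cons h t ih =>
    by_cases hx : h ≥ x <;> by_cases hy : h ≥ y
    · simp only [insertDesc, if_pos hx, if_pos hy, ih]
    · simp only [insertDesc, if_pos hx, if_neg hy]
      rw [if_pos (by omega : y ≥ x)]
    · simp only [insertDesc, if_neg hx, if_pos hy]
      rw [if_pos (by omega : x ≥ y)]
    · rcases lt_trichotomy x y with hlt | heq | hgt
      · rw [insertDesc_cons_lt h t x (by omega), insertDesc_cons_lt x (h :: t) y (by omega),
            insertDesc_cons_lt h t y (by omega),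
            show insertDesc (y :: h :: t) x = y :: insertDesc (h :: t) x from by
              simp only [insertDesc]; rw [if_pos (by omega : y ≥ x)],
            insertDesc_cons_lt h t x (by omega)]
      · subst heq; rfl
      · rw [insertDesc_cons_lt h t x (by omega), insertDesc_cons_lt h t y (by omega),
            insertDesc_cons_lt y (h :: t) x (by omega),
            show insertDesc (x :: h :: t) y = x :: insertDesc (h :: t) y from by
              simp only [insertDesc]; rw [if_pos (by omega : x ≥ y)],
            insertDesc_cons_lt h t y (by omega)]

def insertRep (L : List Int) (x : Int) : Nat → List Int
  | 0 => L
  | n + 1 => insertDesc (insertRep L x n) x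

theorem insertRep_insertDesc (L : List Int) (x y : Int) (n : Nat) :
    insertRep (insertDesc L y) x n = insertDesc (insertRep L x n) y := by
  induction n with
  | zero => rfl
  | succ n ih => simp only [insertRep, ih, insertDesc_comm]

theorem insertRep_succ_inner (L : List Int) (x : Int) (n : Nat) :
    insertRep (insertDesc L x) x n = insertRep L x (n + 1) :=
  insertRep_insertDesc L x x n

theorem insertRep_pass (n m : Nat) (v x : Int) (h : x ≤ v) (R : List Int) :
    insertRep (List.replicate m v ++ R) x n = List.replicate m v ++ insertRep R x n := by
  induction n with
  | zero => rfl
  | succ n ih => simp only [insertRep, ih, insertDesc_pass m v x h]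

theorem insertRep_all_lt (n : Nat) (x : Int) (L : List Int) (h : ∀ z ∈ L, z < x) :
    insertRep L x n = List.replicate n x ++ L := by
  induction n with
  | zero => rfl
  | succ n ih =>
    simp only [insertRep, ih]
    rw [show List.replicate n x = List.replicate n x ++ ([] : List Int) by simp] at *
    rw [List.append_assoc, insertDesc_pass n x x le_rfl]
    cases L with
    | nil => simp [insertDesc, List.replicate_succ']
    | cons w t =>
      rw [List.nil_append, insertDesc_cons_lt w t x (h w (by simp))]
      simp [List.replicate_succ']

-- ---- run-length encoding ----
def flattenRuns (runs : List (Int × Int)) : List Int :=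
  runs.flatMap (fun p => List.replicate p.2.toNat p.1)

def RunsInv : List (Int × Int) → Prop
  | [] => True
  | (v, c) :: t => 1 ≤ c ∧ (∀ q ∈ t, q.1 < v) ∧ RunsInv t

theorem flattenRuns_cons (v c : Int) (t : List (Int × Int)) :
    flattenRuns ((v, c) :: t) = List.replicate c.toNat v ++ flattenRuns t := rfl

theorem rleInsert_fst (runs : List (Int × Int)) (x c : Int) :
    ∀ q ∈ rleInsert runs x c, q.1 = x ∨ q.1 ∈ runs.map Prod.fst := by
  induction runs with
  | nil => simp [rleInsert]
  | cons p t ih =>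
    obtain ⟨v, d⟩ := p
    intro q hq
    simp only [rleInsert] at hq
    split_ifs at hq with h1 h2
    · rcases List.mem_cons.mp hq with rfl | hq
      · right; simp
      · rcases ih q hq with h | h
        · exact Or.inl h
        · right; simp only [List.map_cons, List.mem_cons]; exact Or.inr h
    · rcases List.mem_cons.mp hq with rfl | hq
      · exact Or.inl h2
      · right; simp only [List.map_cons, List.mem_cons]
        exact Or.inr (List.mem_map_of_mem hq)
    · rcases List.mem_cons.mp hq with rfl | hq
      · exact Or.inl rfl
      · right; exact List.mem_map_of_mem hq

theorem rleInsert_inv (runs : List (Int × Int)) (x c : Int) (hc : 1 ≤ c) (h : RunsInv runs) :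
    RunsInv (rleInsert runs x c) := by
  induction runs with
  | nil => exact ⟨hc, by simp, trivial⟩
  | cons p t ih =>
    obtain ⟨v, d⟩ := p
    obtain ⟨hd, hbound, hinvt⟩ := h
    simp only [rleInsert]
    split_ifs with h1 h2
    · refine ⟨hd, ?_, ih hinvt⟩
      intro q hq
      rcases rleInsert_fst t x c q hq with he | he
      · omega
      · rcases List.mem_map.mp he with ⟨p', hp', hpe⟩
        have := hbound p' hp'
        omega
    · exact ⟨by omega, hbound, hinvt⟩
    · exact ⟨hc, by
        intro q hq
        rcases List.mem_cons.mp hq with rfl | hq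
        · simpa using by omega
        · have := hbound q hq; omega, hd, hbound, hinvt⟩

theorem rleInsert_ge (runs : List (Int × Int)) (x c : Int) (hx : -1 ≤ x)
    (h : ∀ q ∈ runs, -1 ≤ q.1) : ∀ q ∈ rleInsert runs x c, -1 ≤ q.1 := by
  intro q hq
  rcases rleInsert_fst runs x c q hq with he | he
  · omega
  · rcases List.mem_map.mp he with ⟨p', hp', hpe⟩
    have := h p' hp'
    omega

theorem rleInsert_ne_nil (runs : List (Int × Int)) (x c : Int) : rleInsert runs x c ≠ [] := by
  cases runs with
  | nil => simp [rleInsert]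
  | cons p t => obtain ⟨v, d⟩ := p; simp only [rleInsert]; split_ifs <;> simp

theorem flatten_lt (t : List (Int × Int)) (v : Int) (h : ∀ q ∈ t, q.1 < v) :
    ∀ z ∈ flattenRuns t, z < v := by
  intro z hz
  simp only [flattenRuns, List.mem_flatMap] at hz
  obtain ⟨p, hp, hzp⟩ := hz
  rw [List.eq_of_mem_replicate hzp]
  exact h p hp

theorem flatten_rleInsert (runs : List (Int × Int)) (x c : Int) (hc : 1 ≤ c) (h : RunsInv runs) :
    flattenRuns (rleInsert runs x c) = insertRep (flattenRuns runs) x c.toNat := by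
  induction runs with
  | nil =>
    show List.replicate c.toNat x ++ [] = insertRep [] x c.toNat
    rw [insertRep_all_lt c.toNat x [] (by simp), List.append_nil]
  | cons p t ih =>
    obtain ⟨v, d⟩ := p
    obtain ⟨hd, hbound, hinvt⟩ := h
    simp only [rleInsert]
    split_ifs with h1 h2
    · rw [flattenRuns_cons, flattenRuns_cons, ih hinvt,
          insertRep_pass c.toNat d.toNat v x (by omega)]
    · subst h2
      rw [flattenRuns_cons, flattenRuns_cons,
          insertRep_pass c.toNat d.toNat v v le_rfl,
          insertRep_all_lt c.toNat v (flattenRuns t) (flatten_lt t v hbound),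
          show (d + c).toNat = d.toNat + c.toNat from by omega,
          List.replicate_add, List.append_assoc]
    · rw [flattenRuns_cons, flattenRuns_cons,
          insertRep_all_lt c.toNat x (List.replicate d.toNat v ++ flattenRuns t) ?_]
      intro z hz
      rcases List.mem_append.mp hz with hz | hz
      · rw [List.eq_of_mem_replicate hz]; omega
      · have := flatten_lt t v hbound z hz; omega

-- consuming a whole run of c equal maximal sizes
theorem midLoop_replicate (v : Int) (hlo : PySem.Int.floordiv (v - 1) 2 ≤ v)
    (hhi : PySem.Int.floordiv v 2 ≤ v) :
    ∀ (c n : Nat) (R : List Int) (a0 : Int),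
    midLoop (c + n) (List.replicate c v ++ R) a0
      = midLoop n (insertRep (insertRep R (PySem.Int.floordiv (v - 1) 2) c)
          (PySem.Int.floordiv v 2) c) (if c = 0 then a0 else v) := by
  intro c
  induction c with
  | zero => intro n R a0; simp [insertRep]
  | succ c ih =>
    intro n R a0
    have hstep : c + 1 + n = (c + n) + 1 := by omega
    rw [hstep]
    simp only [List.replicate_succ, List.cons_append, midLoop]
    rw [insertDesc_pass c v _ hlo, insertDesc_pass c v _ hhi, ih (n) _ v]
    rw [show (if c = 0 then v else v) = v from by split <;> rfl]
    congr 1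
    rw [insertRep_insertDesc (insertDesc R (PySem.Int.floordiv (v - 1) 2))
          (PySem.Int.floordiv (v - 1) 2) (PySem.Int.floordiv v 2) c,
        insertRep_succ_inner R (PySem.Int.floordiv (v - 1) 2) c,
        insertRep_succ_inner (insertRep R (PySem.Int.floordiv (v - 1) 2) (c + 1))
          (PySem.Int.floordiv v 2) c]

-- the grouped RLE loop computes the last popped size of the one-at-a-time loop
theorem bridge : ∀ (fuel : Nat) (runs : List (Int × Int)) (K a0 : Int),
    K.toNat ≤ fuel → 1 ≤ K → RunsInv runs → runs ≠ [] → (∀ q ∈ runs, -1 ≤ q.1) →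
    (midLoop K.toNat (flattenRuns runs) a0).2 = altLoop runs K := by
  intro fuel
  induction fuel with
  | zero => intro runs K a0 hf hK _ _ _; omega
  | succ fuel ih =>
    intro runs K a0 hf hK hinv hne hge
    cases runs with
    | nil => exact absurd rfl hne
    | cons p t =>
      obtain ⟨v, c⟩ := p
      obtain ⟨hc, hbound, hinvt⟩ := hinv
      have hv : -1 ≤ v := hge (v, c) (by simp)
      rw [altLoop]
      rw [if_neg (by omega : ¬ K ≤ 0)]
      by_cases hKc : K ≤ c
      · rw [if_pos hKc]
        have hrep : flattenRuns ((v, c) :: t)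
            = List.replicate K.toNat v ++ (List.replicate (c.toNat - K.toNat) v ++ flattenRuns t) := by
          simp only [flattenRuns, List.flatMap_cons]
          rw [← List.append_assoc, ← List.replicate_add]
          congr 2
          omega
        rw [hrep]
        have h2 := midLoop_replicate v (child_lo_le v hv) (child_hi_le v hv) K.toNat 0
          (List.replicate (c.toNat - K.toNat) v ++ flattenRuns t) a0
        rw [Nat.add_zero] at h2
        rw [h2, if_neg (by omega : ¬ K.toNat = 0)]
        rfl
      · rw [if_neg hKc, max_eq_left (by omega : (1:Int) ≤ c)]
        have hsplit : K.toNat = c.toNat + (K - c).toNat := by omega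
        have hrep : flattenRuns ((v, c) :: t) = List.replicate c.toNat v ++ flattenRuns t := by
          simp [flattenRuns]
        rw [hrep, hsplit, midLoop_replicate v (child_lo_le v hv) (child_hi_le v hv),
            if_neg (by omega : ¬ c.toNat = 0)]
        have hinv1 : RunsInv (rleInsert t (PySem.Int.floordiv (v - 1) 2) c) :=
          rleInsert_inv t _ c hc hinvt
        have hget : ∀ q ∈ t, -1 ≤ q.1 := fun q hq => hge q (List.mem_cons_of_mem _ hq)
        rw [← flatten_rleInsert t _ c hc hinvt, ← flatten_rleInsert _ _ c hc hinv1]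
        exact ih _ (K - c) v (by omega) (by omega)
          (rleInsert_inv _ _ c hc hinv1) (rleInsert_ne_nil _ _ _)
          (rleInsert_ge _ _ c (child_hi_ge v hv)
            (rleInsert_ge _ _ c (child_lo_ge v hv) hget))

theorem join_two (s t : String) : PySem.Str.join " " [s, t] = s ++ " " ++ t := by
  simp only [PySem.Str.join, List.map_cons, List.map_nil]
  rw [show " ".toList = [' '] from rfl, PySem.Chars.join_cons_cons, PySem.Chars.join_singleton]
  apply String.toList_injective
  simp [String.toList_ofList, String.toList_append]

-- ===== VERDICT (by name: the statement is the Claim_ definition above) =====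
theorem solve_spec : Claim_equal_solve := by
  intro N K _ hpre
  show solve N K = solve_alt N K
  by_cases hK : K ≤ 0
  · have : K.toNat = 0 := by
      omega
    simp [solve, solve_alt, hK, this, solveLoop]
    decide
  · have hb := loop_bisim K.toNat (heapPush (N * -1) .nil) [N] 0 0 N
      (Hp_push _ _ trivial) (by rw [toMS_push]; rfl) (by simp) (by simp)
      (fun h => absurd h (by omega))
    have hbr : (midLoop K.toNat [N] N).2 = altLoop [(N, 1)] K := by
      by_cases hK1 : K = 1
      · subst hK1
        simp [midLoop, altLoop]
      · have hN : (-1:Int) ≤ N := by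
          rcases hpre with h | h
          · exact h
          · omega
        have hfl : flattenRuns [(N, 1)] = [N] := rfl
        rw [← hfl]
        exact bridge K.toNat [(N, 1)] K N le_rfl (by omega)
          ⟨le_rfl, by simp, trivial⟩ (by simp)
          (by intro q hq; simp only [List.mem_singleton] at hq; subst hq; simpa using by omega)
    set r := (midLoop K.toNat [N] N).2 with hr
    have hle := floordiv_le r
    have hmax : max (PySem.Int.floordiv (r - 1) 2) (r - 1 - PySem.Int.floordiv (r - 1) 2)
        = PySem.Int.floordiv r 2 := by
      rw [floordiv_pair]
      exact max_eq_right hle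
    have hmin : min (PySem.Int.floordiv (r - 1) 2) (r - 1 - PySem.Int.floordiv (r - 1) 2)
        = PySem.Int.floordiv (r - 1) 2 := by
      rw [floordiv_pair]
      exact min_eq_left hle
    simp only [solve, solve_alt, hK, if_false, hb, hmax, hmin, join_two, ← hbr]
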